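-- pv_equiv track=rewrite | github.com/EvanArcher/Casino_Yahtzee | Python_Code/Yahztee_Function_Library.py | has_nums_in_order
-- ===== SOURCE A (Python) =====
-- def has_nums_in_order(numbers, nums_in_a_row):
--     """
--     Check if at least 3 numbers in the set are in consecutive ascending order.
--
--     Args:
--         numbers (set or list): A set or list of numbers.
--         nums_in_a_row (int): Value saying how many numbers you need in a row
--
--     Returns:
--         bool: True if at least 3 numbers are in order, False otherwise.
--     """
--     sorted_numbers = sorted(set(numbers))  # Sort the numbers
--     count = 1  # Count consecutive numbers
--
--     # Iterate through the sorted numbers to check for consecutive order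
--     for i in range(1, len(sorted_numbers)):
--         if sorted_numbers[i] == sorted_numbers[i - 1] + 1:  # Check if consecutive
--             count += 1
--             if count == nums_in_a_row:  # Found at least x in order
--                 return True
--         else:
--             count = 1  # Reset the count if not consecutive
--
--     return False  # No x consecutive numbers found
-- ===== SOURCE B (Python) =====
-- def has_nums_in_order(numbers, nums_in_a_row):
--     s = set(numbers)
--     for x in s:
--         if x - 1 not in s:  # x starts a maximal run
--             count = 1
--             y = x
--             while y + 1 in s:
--                 y += 1
--                 count += 1
--                 if count == nums_in_a_row:
--                     return True
--     return False
-- ===== Notes on version B (the rewrite author's own statement) =====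
-- stated objective: alternative
-- what changed: Replaces A's sort-then-adjacent-scan over sorted(set(numbers)) with a set-based walk: for each run start x (x-1 not in the set) walk y+1,y+2,... forward counting, returning True when the count reaches nums_in_a_row; no sorting at all.
import Mathlib
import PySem

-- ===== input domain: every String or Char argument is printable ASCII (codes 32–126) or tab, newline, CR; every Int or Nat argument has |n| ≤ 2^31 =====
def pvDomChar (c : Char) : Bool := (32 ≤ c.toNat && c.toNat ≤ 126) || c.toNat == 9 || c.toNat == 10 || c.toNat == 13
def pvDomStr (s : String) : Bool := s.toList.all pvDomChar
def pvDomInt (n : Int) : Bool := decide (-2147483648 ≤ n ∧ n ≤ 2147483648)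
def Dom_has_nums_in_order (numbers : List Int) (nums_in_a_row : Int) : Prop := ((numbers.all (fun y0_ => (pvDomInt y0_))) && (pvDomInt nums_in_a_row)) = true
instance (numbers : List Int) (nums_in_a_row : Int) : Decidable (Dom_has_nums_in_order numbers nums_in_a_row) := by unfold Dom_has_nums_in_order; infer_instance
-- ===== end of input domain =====

-- B replaces A's sort-then-scan with a set-based maximal-run walk (sets only, no sorting); same return value everywhere.

-- ===== PORT A =====
-- the for-loop over sorted(set(numbers)) with state (previous element, count), early return True
def pyALoop (k : Int) : List Int → Int → Int → Bool
  | [], _, _ => false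
  | x :: t, prev, c =>
    if x = prev + 1 then
      if c + 1 = k then true else pyALoop k t x (c + 1)
    else pyALoop k t x 1

def has_nums_in_order (numbers : List Int) (nums_in_a_row : Int) : Bool :=
  match PySem.List.sorted (PySem.Set.ofList numbers) (fun x => x) false with
  | [] => false
  | h :: t => pyALoop nums_in_a_row t h 1

-- ===== PORT B =====
-- the 'while y+1 in s' walk; fuel s.length only makes it total: the walk visits distinct
-- members of the duplicate-free list s, so fuel never runs out before the while-test fails
def pyWalk (s : PySem.Set Int) (k : Int) : Int → Int → Nat → Bool
  | _, _, 0 => false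
  | y, c, fuel + 1 =>
    if PySem.Set.contains s (y + 1) then
      if c + 1 = k then true else pyWalk s k (y + 1) (c + 1) fuel
    else false

def has_nums_in_order_alt (numbers : List Int) (nums_in_a_row : Int) : Bool :=
  let s := PySem.Set.ofList numbers
  s.any (fun x => !(PySem.Set.contains s (x - 1)) && pyWalk s nums_in_a_row x 1 s.length)

-- ===== PRECONDITION & SPEC =====
def Spec_has_nums_in_order (numbers : List Int) (nums_in_a_row : Int) (out : Bool) : Prop := out = has_nums_in_order_alt numbers nums_in_a_row
instance (numbers : List Int) (nums_in_a_row : Int) (out : Bool) : Decidable (Spec_has_nums_in_order numbers nums_in_a_row out) := by unfold Spec_has_nums_in_order; infer_instance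

-- ===== CLAIM (what is proved, stated in full; the proofs are below) =====
def Claim_equal_has_nums_in_order : Prop := ∀ (numbers : List Int) (nums_in_a_row : Int), Dom_has_nums_in_order numbers nums_in_a_row → Spec_has_nums_in_order numbers nums_in_a_row (has_nums_in_order numbers nums_in_a_row)

-- ===== LEMMAS AND PROOFS =====

-- both programs decide this: some x starts an ascending chain of k consecutive members (k ≥ 2)
def GoodChain (s : List Int) (k : Int) : Prop :=
  2 ≤ k ∧ ∃ x : Int, ∀ j : Int, 0 ≤ j → j < k → (x + j) ∈ s

theorem chain_le_length (s : List Int) (_hn : s.Nodup) (x : Int) (n : Nat)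
    (h : ∀ i : Nat, i < n → x + (i : Int) ∈ s) : n ≤ s.length := by
  have hnd : ((List.range n).map (fun i : Nat => x + (i : Int))).Nodup := by
    refine (List.nodup_range).map ?_
    intro a b hab
    have h2 : (a : Int) = b := add_left_cancel hab
    exact_mod_cast h2
  have hsub : (List.range n).map (fun i : Nat => x + (i : Int)) ⊆ s := by
    intro z hz
    simp only [List.mem_map, List.mem_range] at hz
    obtain ⟨i, hi, rfl⟩ := hz
    exact h i hi
  have hle := (hnd.subperm hsub).length_le
  simpa using hle

theorem runStart (s : List Int) (hn : s.Nodup) (k : Int) (hk : 2 ≤ k) (x : Int)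
    (hch : ∀ j : Int, 0 ≤ j → j < k → x + j ∈ s) :
    ∃ r : Int, (r - 1) ∉ s ∧ ∀ j : Int, 0 ≤ j → j < k → r + j ∈ s := by
  have hx0 : x ∈ s := by simpa using hch 0 le_rfl (by omega)
  have hPN : ¬ (∀ i : Nat, i ≤ s.length → x - (i : Int) ∈ s) := by
    intro hP
    have hb := chain_le_length s hn (x - (s.length : Int)) (s.length + 1) ?_
    · omega
    · intro i hi
      have h2 := hP (s.length - i) (Nat.sub_le _ _)
      have he : x - (s.length : Int) + (i : Int) = x - ((s.length - i : Nat) : Int) := by omega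
      rwa [he]
  have hP0 : ∀ i : Nat, i ≤ 0 → x - (i : Int) ∈ s := by
    intro i hi
    interval_cases i
    simpa using hx0
  have hPM : ∀ i : Nat, i ≤ Nat.findGreatest (fun m => ∀ i : Nat, i ≤ m → x - (i : Int) ∈ s) s.length → x - (i : Int) ∈ s := by
    simpa using Nat.findGreatest_spec (P := fun m => ∀ i : Nat, i ≤ m → x - (i : Int) ∈ s) (Nat.zero_le _) hP0
  set M := Nat.findGreatest (fun m => ∀ i : Nat, i ≤ m → x - (i : Int) ∈ s) s.length with hMdef
  have hMle : M ≤ s.length := Nat.findGreatest_le _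
  have hMlt : M < s.length := by
    rcases lt_or_eq_of_le hMle with h | h
    · exact h
    · exact absurd (h ▸ hPM) hPN
  have hnotM1 : ¬ (∀ i : Nat, i ≤ M + 1 → x - (i : Int) ∈ s) :=
    Nat.findGreatest_is_greatest (Nat.lt_succ_self M) hMlt
  have hout : x - ((M : Int) + 1) ∉ s := by
    intro hmem
    apply hnotM1
    intro i hi
    rcases Nat.lt_or_ge i (M + 1) with h | h
    · exact hPM i (by omega)
    · have : i = M + 1 := by omega
      subst this
      have he : ((M + 1 : Nat) : Int) = (M : Int) + 1 := by omega
      rwa [he]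
  refine ⟨x - (M : Int), by simpa [sub_sub] using hout, ?_⟩
  intro j h0 hj
  rcases le_or_gt j (M : Int) with hjM | hjM
  · have hjn : j.toNat ≤ M := by omega
    have h2 := hPM (M - j.toNat) (Nat.sub_le _ _)
    have he : x - (M : Int) + j = x - ((M - j.toNat : Nat) : Int) := by omega
    rwa [he]
  · have h2 := hch (j - (M : Int)) (by omega) (by omega)
    have he : x - (M : Int) + j = x + (j - (M : Int)) := by ring
    rwa [he]

theorem aloop_sound (s : List Int) (k : Int) :
    ∀ (t : List Int) (prev c : Int), pyALoop k t prev c = true → 1 ≤ c →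
      (∀ j : Int, 0 ≤ j → j < c → prev - j ∈ s) → (∀ z ∈ t, z ∈ s) → GoodChain s k := by
  intro t
  induction t with
  | nil => intro prev c hT _ _ _; simp [pyALoop] at hT
  | cons x t ih =>
    intro prev c hT hc hbehind hsub
    have hxs : x ∈ s := hsub x (by simp)
    have hsub' : ∀ z ∈ t, z ∈ s := fun z hz => hsub z (by simp [hz])
    by_cases hadj : x = prev + 1
    · by_cases hck : c + 1 = k
      · refine ⟨by omega, x - (k - 1), ?_⟩
        intro j h0 hj
        by_cases hjk : j = k - 1
        · subst hjk
          have he : x - (k - 1) + (k - 1) = x := by ring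
          rwa [he]
        · have he : x - (k - 1) + j = prev - (k - 2 - j) := by omega
          rw [he]
          exact hbehind (k - 2 - j) (by omega) (by omega)
      · have hT' : pyALoop k t x (c + 1) = true := by
          simpa [pyALoop, hadj, hck] using hT
        refine ih x (c + 1) hT' (by omega) ?_ hsub'
        intro j h0 hj
        by_cases hj0 : j = 0
        · subst hj0; simpa using hxs
        · have he : x - j = prev - (j - 1) := by omega
          rw [he]
          exact hbehind (j - 1) (by omega) (by omega)
    · have hT' : pyALoop k t x 1 = true := by
        simpa [pyALoop, hadj] using hT
      refine ih x 1 hT' (by omega) ?_ hsub'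
      intro j h0 hj
      have hj0 : j = 0 := by omega
      subst hj0; simpa using hxs

theorem aloop_complete (s : List Int) (k r : Int) (hk : 2 ≤ k) (hr1 : (r - 1) ∉ s)
    (hch : ∀ j : Int, 0 ≤ j → j < k → r + j ∈ s) :
    ∀ (t : List Int) (prev c : Int), (prev :: t).Pairwise (· < ·) → prev ∈ s →
      (∀ z ∈ t, z ∈ s) → (∀ z ∈ s, prev < z → z ∈ t) →
      ((prev < r ∧ 1 ≤ c) ∨ (r ≤ prev ∧ prev < r + k - 1 ∧ c = prev - r + 1)) →
      pyALoop k t prev c = true := by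
  intro t
  induction t with
  | nil =>
    intro prev c _ _ _ hsuffix hinv
    exfalso
    have hrk : r + (k - 1) ∈ s := hch (k - 1) (by omega) (by omega)
    have hlt : prev < r + (k - 1) := by rcases hinv with ⟨h1, _⟩ | ⟨h1, h2, _⟩ <;> omega
    simpa using hsuffix _ hrk hlt
  | cons x t ih =>
    intro prev c hpw hprev hsub hsuffix hinv
    have hpx : prev < x := (List.pairwise_cons.mp hpw).1 x (by simp)
    have hxs : x ∈ s := hsub x (by simp)
    have hpw' : (x :: t).Pairwise (· < ·) := (List.pairwise_cons.mp hpw).2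
    have hsub' : ∀ z ∈ t, z ∈ s := fun z hz => hsub z (by simp [hz])
    have hsuffix' : ∀ z ∈ s, x < z → z ∈ t := by
      intro z hz hxz
      have h2 := hsuffix z hz (by omega)
      simp only [List.mem_cons] at h2
      rcases h2 with h2 | h2
      · omega
      · exact h2
    rcases hinv with ⟨h1, hc1⟩ | ⟨h1, h2, h3⟩
    · have hprev_ne : prev ≠ r - 1 := fun h => hr1 (h ▸ hprev)
      by_cases hadj : x = prev + 1
      · have hxne : x ≠ r - 1 := fun h => hr1 (h ▸ hxs)
        have hxr : x < r := by omega
        by_cases hck : c + 1 = k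
        · simp [pyALoop, hadj, hck]
        · simp only [pyALoop, if_pos hadj, if_neg hck]
          exact ih x (c + 1) hpw' hxs hsub' hsuffix' (Or.inl ⟨hxr, by omega⟩)
      · have hxle : x ≤ r := by
          by_contra hgt
          have hrin : r ∈ s := by simpa using hch 0 le_rfl (by omega)
          have h2 := hsuffix r hrin (by omega)
          simp only [List.mem_cons] at h2
          rcases h2 with h2 | h2
          · omega
          · have := (List.pairwise_cons.mp hpw').1 r h2; omega
        simp only [pyALoop, if_neg hadj]
        by_cases hxr : x = r
        · exact ih x 1 hpw' hxs hsub' hsuffix' (Or.inr ⟨by omega, by omega, by omega⟩)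
        · exact ih x 1 hpw' hxs hsub' hsuffix' (Or.inl ⟨by omega, by omega⟩)
    · have hnext : prev + 1 ∈ s := by
        have h4 := hch (prev - r + 1) (by omega) (by omega)
        have he : r + (prev - r + 1) = prev + 1 := by ring
        rwa [he] at h4
      have hmem : prev + 1 ∈ x :: t := hsuffix _ hnext (by omega)
      have hadj : x = prev + 1 := by
        simp only [List.mem_cons] at hmem
        rcases hmem with h4 | h4
        · omega
        · have := (List.pairwise_cons.mp hpw').1 _ h4; omega
      by_cases hck : c + 1 = k
      · simp [pyALoop, hadj, hck]
      · simp only [pyALoop, if_pos hadj, if_neg hck]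
        exact ih x (c + 1) hpw' hxs hsub' hsuffix' (Or.inr ⟨by omega, by omega, by omega⟩)

theorem A_iff (numbers : List Int) (k : Int) :
    has_nums_in_order numbers k = true ↔ GoodChain (PySem.Set.ofList numbers) k := by
  have hmem := PySem.List.mem_sorted (PySem.Set.ofList numbers) (fun x => x) false
  have hpwlt := PySem.List.sorted_ofList_pairwise_lt numbers
  unfold has_nums_in_order
  rcases hL : PySem.List.sorted (PySem.Set.ofList numbers) (fun x => x) false with _ | ⟨h, t⟩
  · constructor
    · intro hfalse; exact absurd hfalse (by simp)
    · rintro ⟨hk, x, hx⟩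
      exfalso
      have hxin : x ∈ PySem.Set.ofList numbers := by simpa using hx 0 le_rfl (by omega)
      have h2 := (hmem x).mpr hxin
      rw [hL] at h2
      simp at h2
  · rw [hL] at hmem hpwlt
    have hpw : (h :: t).Pairwise (· < ·) := hpwlt
    constructor
    · intro hT
      refine aloop_sound (PySem.Set.ofList numbers) k t h 1 hT le_rfl ?_ ?_
      · intro j h0 hj
        have hj0 : j = 0 := by omega
        subst hj0
        have : h ∈ h :: t := by simp
        simpa using (hmem h).mp this
      · intro z hz
        exact (hmem z).mp (by simp [hz])
    · rintro ⟨hk, x, hx⟩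
      have hnodup : (h :: t).Nodup := hpw.imp (fun hab => ne_of_lt hab)
      have hx' : ∀ j : Int, 0 ≤ j → j < k → x + j ∈ h :: t :=
        fun j a b => (hmem _).mpr (hx j a b)
      obtain ⟨r, hr1, hch⟩ := runStart (h :: t) hnodup k hk x hx'
      have hrin : r ∈ h :: t := by simpa using hch 0 le_rfl (by omega)
      refine aloop_complete (h :: t) k r hk hr1 hch t h 1 hpw (by simp)
        (fun z hz => by simp [hz]) ?_ ?_
      · intro z hz hlt
        simp only [List.mem_cons] at hz
        rcases hz with hz | hz
        · omega
        · exact hz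
      · simp only [List.mem_cons] at hrin
        rcases hrin with hrh | hrt
        · exact Or.inr ⟨by omega, by omega, by omega⟩
        · have hhr : h < r := (List.pairwise_cons.mp hpw).1 r hrt
          exact Or.inl ⟨by omega, le_rfl⟩

theorem walk_sound (s : PySem.Set Int) (k : Int) :
    ∀ (fuel : Nat) (y c : Int), pyWalk s k y c fuel = true →
      ∃ m : Nat, 1 ≤ m ∧ (∀ i : Nat, 1 ≤ i → i ≤ m → y + (i : Int) ∈ s) ∧ c + m = k := by
  intro fuel
  induction fuel with
  | zero => intro y c hT; simp [pyWalk] at hT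
  | succ fuel ih =>
    intro y c hT
    simp only [pyWalk] at hT
    by_cases hcont : PySem.Set.contains s (y + 1) = true
    · rw [if_pos hcont] at hT
      have hy1 : y + 1 ∈ s := (PySem.Set.contains_iff _ _).mp hcont
      by_cases hck : c + 1 = k
      · refine ⟨1, le_rfl, ?_, by omega⟩
        intro i hi1 hi2
        have hi : i = 1 := by omega
        subst hi
        simpa using hy1
      · rw [if_neg hck] at hT
        obtain ⟨m, hm1, hmc, hmk⟩ := ih (y + 1) (c + 1) hT
        refine ⟨m + 1, by omega, ?_, by push_cast; omega⟩
        intro i hi1 hi2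
        by_cases hi : i = 1
        · subst hi; simpa using hy1
        · have h2 := hmc (i - 1) (by omega) (by omega)
          have he : y + 1 + ((i - 1 : Nat) : Int) = y + (i : Int) := by omega
          rwa [he] at h2
    · rw [if_neg hcont] at hT
      exact absurd hT (by simp)

theorem walk_complete (s : PySem.Set Int) (k : Int) :
    ∀ (fuel : Nat) (y c : Int), 1 ≤ c → c < k →
      (∀ j : Int, 1 ≤ j → j ≤ k - c → y + j ∈ s) → k - c ≤ (fuel : Int) →
      pyWalk s k y c fuel = true := by
  intro fuel
  induction fuel with
  | zero => intro y c hc hck _ hfu; exfalso; simp at hfu; omega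
  | succ fuel ih =>
    intro y c hc hck hchain hfu
    have hy1 : y + 1 ∈ s := hchain 1 le_rfl (by omega)
    have hcont : PySem.Set.contains s (y + 1) = true := (PySem.Set.contains_iff _ _).mpr hy1
    simp only [pyWalk]
    rw [if_pos hcont]
    by_cases hckk : c + 1 = k
    · rw [if_pos hckk]
    · rw [if_neg hckk]
      refine ih (y + 1) (c + 1) (by omega) (by omega) ?_ (by push_cast at hfu ⊢; omega)
      intro j hj1 hj2
      have h2 := hchain (j + 1) (by omega) (by omega)
      have he : y + 1 + j = y + (j + 1) := by ring
      rwa [he]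

theorem B_iff (numbers : List Int) (k : Int) :
    has_nums_in_order_alt numbers k = true ↔ GoodChain (PySem.Set.ofList numbers) k := by
  have hnd : (PySem.Set.ofList numbers).Nodup := PySem.Set.nodup_ofList numbers
  unfold has_nums_in_order_alt
  simp only [List.any_eq_true, Bool.and_eq_true, Bool.not_eq_true']
  constructor
  · rintro ⟨x, hx, hnc, hw⟩
    obtain ⟨m, hm1, hmc, hmk⟩ := walk_sound _ _ _ x 1 hw
    refine ⟨by omega, x, ?_⟩
    intro j h0 hj
    by_cases hj0 : j = 0
    · subst hj0; simpa using hx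
    · have h2 := hmc j.toNat (by omega) (by omega)
      have he : x + ((j.toNat : Nat) : Int) = x + j := by omega
      rwa [he] at h2
  · rintro ⟨hk, x, hx⟩
    obtain ⟨r, hr1, hch⟩ := runStart _ hnd k hk x hx
    have hrin : r ∈ PySem.Set.ofList numbers := by simpa using hch 0 le_rfl (by omega)
    have hlen : k.toNat ≤ (PySem.Set.ofList numbers).length := by
      refine chain_le_length _ hnd r k.toNat ?_
      intro i hi
      exact hch i (by omega) (by omega)
    refine ⟨r, hrin, ?_, ?_⟩
    · exact Bool.eq_false_iff.mpr (fun hcc => hr1 ((PySem.Set.contains_iff _ _).mp hcc))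
    · refine walk_complete _ _ _ r 1 le_rfl (by omega) ?_ (by omega)
      intro j hj1 hj2
      exact hch j (by omega) (by omega)

-- ===== VERDICT (by name: the statement is the Claim_ definition above) =====
theorem has_nums_in_order_spec : Claim_equal_has_nums_in_order := by
  intro numbers k _
  unfold Spec_has_nums_in_order
  rw [Bool.eq_iff_iff, A_iff, B_iff]
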